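-- pv_equiv track=rewrite | github.com/wcyn/data-structures | Python/Cake/permutation_is_palindrome.py | permutation_is_palindrome_2
-- ===== SOURCE A (Python) =====
-- def permutation_is_palindrome_2(chars):
--     char_set = set()
--     for char in chars:
--         if char in char_set:
--             char_set.remove(char)
--         else:
--             char_set.add(char)
--
--     return len(char_set) < 2
-- ===== SOURCE B (Python) =====
-- def permutation_is_palindrome_2(chars):
--     counts = {}
--     for char in chars:
--         counts[char] = counts.get(char, 0) + 1
--     odd = 0
--     for v in counts.values():
--         if v % 2:
--             odd += 1
--     return odd < 2
-- ===== Notes on version B (the rewrite author's own statement) =====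
-- stated objective: alternative
-- what changed: Replaces A's incremental parity-toggling set (add/remove per char, then check the surviving set's size) with a two-pass count-then-check: build a full frequency dict, then count how many frequencies are odd and return odd < 2.
import Mathlib
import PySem

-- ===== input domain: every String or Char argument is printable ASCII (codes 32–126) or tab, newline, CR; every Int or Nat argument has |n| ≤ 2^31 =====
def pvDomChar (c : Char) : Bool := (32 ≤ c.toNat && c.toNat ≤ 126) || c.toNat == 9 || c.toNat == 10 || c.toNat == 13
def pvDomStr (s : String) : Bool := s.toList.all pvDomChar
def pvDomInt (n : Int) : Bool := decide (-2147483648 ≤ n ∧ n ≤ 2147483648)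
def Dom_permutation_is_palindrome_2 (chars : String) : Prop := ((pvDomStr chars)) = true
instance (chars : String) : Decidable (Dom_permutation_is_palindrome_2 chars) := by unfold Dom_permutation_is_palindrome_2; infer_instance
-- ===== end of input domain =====

-- B replaces A's incremental parity-toggle set with a count-then-check-parities pass (objective: simpler/alternative, same cost).

-- ===== PORT A =====
-- the 'remove' branch is guarded by the membership test, so it never raises; Set.discard is exact there
def permutation_is_palindrome_2 (chars : String) : Bool :=
  let char_set : PySem.Set Char :=
    chars.toList.foldl
      (fun s c => if PySem.Set.contains s c then PySem.Set.discard s c else PySem.Set.add s c)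
      PySem.Set.empty
  decide (PySem.Set.len char_set < 2)

-- ===== PORT B =====
def permutation_is_palindrome_2_alt (chars : String) : Bool :=
  let counts : PySem.Dict Char Int :=
    chars.toList.foldl (fun d c => d.insert c (d.getD c 0 + 1)) PySem.Dict.empty
  let odd : Int :=
    (PySem.Dict.values counts).foldl (fun acc v => if v % 2 ≠ 0 then acc + 1 else acc) 0
  decide (odd < 2)

-- ===== PRECONDITION & SPEC =====
def Spec_permutation_is_palindrome_2 (chars : String) (out : Bool) : Prop := out = permutation_is_palindrome_2_alt chars
instance (chars : String) (out : Bool) : Decidable (Spec_permutation_is_palindrome_2 chars out) := by unfold Spec_permutation_is_palindrome_2; infer_instance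

-- ===== CLAIM (what is proved, stated in full; the proofs are below) =====
def Claim_equal_permutation_is_palindrome_2 : Prop := ∀ (chars : String), Dom_permutation_is_palindrome_2 chars → Spec_permutation_is_palindrome_2 chars (permutation_is_palindrome_2 chars)

-- ===== LEMMAS AND PROOFS =====

-- The toggle set after processing l is nodup and contains exactly the chars occurring an odd number of times in l.
theorem toggle_invariant (l : List Char) :
    (l.foldl (fun s c => if PySem.Set.contains s c then PySem.Set.discard s c else PySem.Set.add s c)
      (PySem.Set.empty : PySem.Set Char)).Nodup ∧
    ∀ c, c ∈ (l.foldl (fun s c => if PySem.Set.contains s c then PySem.Set.discard s c else PySem.Set.add s c)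
      (PySem.Set.empty : PySem.Set Char)) ↔ l.count c % 2 = 1 := by
  induction l using List.reverseRecOn with
  | nil => simp [PySem.Set.empty]
  | append_singleton l c ih =>
    obtain ⟨hnd, hmem⟩ := ih
    rw [List.foldl_append]
    set S := l.foldl (fun s c => if PySem.Set.contains s c then PySem.Set.discard s c else PySem.Set.add s c)
      (PySem.Set.empty : PySem.Set Char) with hS
    simp only [List.foldl_cons, List.foldl_nil]
    by_cases h : c ∈ S
    · have hb : PySem.Set.contains S c = true := (PySem.Set.contains_iff S c).mpr h
      have hc : l.count c % 2 = 1 := (hmem c).mp h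
      rw [hb, if_pos rfl]
      refine ⟨PySem.Set.nodup_discard S c hnd, fun c' => ?_⟩
      rw [PySem.Set.mem_discard, hmem c', List.count_append]
      by_cases hcc : c' = c
      · subst hcc; simp; omega
      · have hcc' : ¬ c = c' := fun h => hcc (Eq.symm h)
        simp [hcc', hcc]
    · have hb : PySem.Set.contains S c = false := by
        by_contra hb'
        exact h ((PySem.Set.contains_iff S c).mp (by revert hb'; cases PySem.Set.contains S c <;> simp))
      have hc : l.count c % 2 = 0 := by
        have := (hmem c).not.mp h; omega
      rw [hb]; simp only [Bool.false_eq_true, if_false]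
      refine ⟨PySem.Set.nodup_add S c hnd, fun c' => ?_⟩
      rw [PySem.Set.mem_add, hmem c', List.count_append]
      by_cases hcc : c' = c
      · subst hcc
        have hm : ¬ l.count c' % 2 = 1 := (hmem c').not.mp h
        simp; omega
      · have hcc' : ¬ c = c' := fun h => hcc (Eq.symm h)
        simp [hcc', hcc]

theorem lengths_eq (l : List Char) :
    (l.foldl (fun s c => if PySem.Set.contains s c then PySem.Set.discard s c else PySem.Set.add s c)
      (PySem.Set.empty : PySem.Set Char)).length =
    ((PySem.Set.ofList l).filter (fun c => l.count c % 2 = 1)).length := by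
  obtain ⟨hnd, hmem⟩ := toggle_invariant l
  apply List.Perm.length_eq
  rw [List.perm_ext_iff_of_nodup hnd (List.Nodup.filter _ (PySem.Set.nodup_ofList l))]
  intro c
  rw [hmem c, List.mem_filter, PySem.Set.mem_ofList]
  constructor
  · intro h
    refine ⟨?_, by simpa using h⟩
    have : l.count c ≠ 0 := by omega
    exact List.count_pos_iff.mp (Nat.pos_of_ne_zero this)
  · intro ⟨_, h⟩; simpa using h

-- ===== VERDICT (by name: the statement is the Claim_ definition above) =====
theorem permutation_is_palindrome_2_spec : Claim_equal_permutation_is_palindrome_2 := by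
  intro chars _
  unfold Spec_permutation_is_palindrome_2 permutation_is_palindrome_2 permutation_is_palindrome_2_alt
  simp only [PySem.Dict.foldl_insert_getD_add_one_eq_counter]
  have hv : PySem.Dict.values (PySem.Dict.counter chars.toList)
      = (PySem.Set.ofList chars.toList).map (fun k => ((chars.toList.count k : Int))) := by
    show ((PySem.Dict.counter chars.toList).items).map (·.2) = _
    rw [PySem.Dict.items_counter, List.map_map]
    rfl
  simp only [hv, PySem.List.foldl_ite_add_one (fun v : Int => v % 2 ≠ 0), List.countP_map,
    zero_add]
  have hlen : PySem.Set.len (chars.toList.foldl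
        (fun s c => if PySem.Set.contains s c then PySem.Set.discard s c else PySem.Set.add s c)
        (PySem.Set.empty : PySem.Set Char))
      = ((List.countP ((fun v : Int => decide (v % 2 ≠ 0)) ∘ fun k => ((chars.toList.count k : Int)))
          (PySem.Set.ofList chars.toList) : Nat) : Int) := by
    show ((_ : List Char).length : Int) = _
    rw [lengths_eq chars.toList, ← List.countP_eq_length_filter]
    congr 1
    apply List.countP_congr
    intro c _
    simp only [Function.comp, decide_eq_true_eq]
    constructor <;> (intro h; omega)
  rw [hlen]
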